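-- pv_equiv track=rewrite | github.com/HHolte/apps-trondheim-academic | dojo/04-advent-of-code-2023/solutions/day3/part_b_hakon.py | get_numbers_and_symbols
-- ===== SOURCE A (Python) =====
-- def get_numbers_and_symbols(length_of_line, line):
--     numbers = []
--     indices = []
--     symbol_indices = []
--     number = ""
--     for index in range(length_of_line):
--         if line[index].isdigit():
--             number += line[index]
--         else:
--             if line[index] == "*":
--                 symbol_indices.append(index)
--             if len(number) > 0:
--                 numbers.append(number)
--                 indices.append(index - len(number))
--                 number = ""
--         if index == length_of_line - 1 and len(number) > 0:
--             numbers.append(number)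
--             indices.append(index - len(number) + 1)
--
--     return numbers, indices, symbol_indices
-- ===== SOURCE B (Python) =====
-- def get_numbers_and_symbols(length_of_line, line):
--     s = line[:max(length_of_line, 0)]
--     numbers, indices, symbol_indices = [], [], []
--     i, n = 0, len(s)
--     while i < n:
--         if s[i].isdigit():
--             j = i
--             while j < n and s[j].isdigit():
--                 j += 1
--             numbers.append(s[i:j])
--             indices.append(i)
--             i = j
--         else:
--             if s[i] == '*':
--                 symbol_indices.append(i)
--             i += 1
--     return numbers, indices, symbol_indices
-- ===== Notes on version B (the rewrite author's own statement) =====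
-- stated objective: alternative
-- what changed: Replaces the per-character state machine (a 'number' accumulator string grown with += and flushed on non-digits plus a special end-of-loop flush) by a two-pointer run scanner over the sliced prefix: on a digit it advances an inner pointer to the end of the run and appends the slice and its start index, eliminating the accumulator and the last-index special case.
import Mathlib
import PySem

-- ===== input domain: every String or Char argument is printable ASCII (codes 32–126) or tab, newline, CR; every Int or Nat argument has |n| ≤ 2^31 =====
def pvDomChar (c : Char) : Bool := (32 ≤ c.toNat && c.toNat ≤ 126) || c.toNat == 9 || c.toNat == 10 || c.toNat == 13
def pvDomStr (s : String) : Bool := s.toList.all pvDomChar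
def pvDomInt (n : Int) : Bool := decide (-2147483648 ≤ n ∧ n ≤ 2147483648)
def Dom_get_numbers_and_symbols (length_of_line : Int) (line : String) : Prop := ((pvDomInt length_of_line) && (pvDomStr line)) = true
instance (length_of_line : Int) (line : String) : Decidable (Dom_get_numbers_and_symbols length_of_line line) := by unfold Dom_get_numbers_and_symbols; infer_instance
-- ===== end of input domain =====

-- B replaces A's per-character accumulator state machine by a two-pointer digit-run scanner
-- over the sliced prefix (alternative decomposition, same O(n) cost).


-- ===== PORT A =====
-- loop body of A; `line[index]` is ported as pyGetD (total form), exact under Pre_ (0 ≤ index < len(line))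
def pvStepA (line : String) (length_of_line : Int)
    (st : List String × List Int × List Int × List Char) (index : Int) :
    List String × List Int × List Int × List Char :=
  let (numbers, indices, symbol_indices, number) := st
  let c := PySem.List.pyGetD line.toList index ' '
  let st' :=
    if PySem.Chars.isdigit c then
      (numbers, indices, symbol_indices, number ++ [c])
    else
      let symbol_indices := if c = '*' then symbol_indices ++ [index] else symbol_indices
      if number.length > 0 then
        (numbers ++ [String.ofList number], indices ++ [index - (number.length : Int)], symbol_indices, ([] : List Char))
      else
        (numbers, indices, symbol_indices, number)
  if index = length_of_line - 1 ∧ 0 < st'.2.2.2.length then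
    (st'.1 ++ [String.ofList st'.2.2.2], st'.2.1 ++ [index - (st'.2.2.2.length : Int) + 1], st'.2.2.1, st'.2.2.2)
  else st'

def get_numbers_and_symbols (length_of_line : Int) (line : String) : List String × List Int × List Int :=
  let final := (PySem.List.pyRange 0 length_of_line 1).foldl (pvStepA line length_of_line) ([], [], [], [])
  (final.1, final.2.1, final.2.2.1)

-- ===== PORT B =====
-- inner while loop of B: first position ≥ j holding a non-digit (or the end);
-- fuel (called with s.length) only makes the recursion structural, it never cuts it short
def pvRunEnd (s : List Char) (fuel j : Nat) : Nat :=
  match fuel with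
  | 0 => j
  | fuel + 1 =>
    if h : j < s.length then
      if PySem.Chars.isdigit s[j] then pvRunEnd s fuel (j + 1) else j
    else j

-- outer while loop of B (fuel likewise only a structural-totality guard)
def pvScanB (s : List Char) (fuel i : Nat)
    (numbers : List String) (indices symbol_indices : List Int) :
    List String × List Int × List Int :=
  match fuel with
  | 0 => (numbers, indices, symbol_indices)
  | fuel + 1 =>
    if h : i < s.length then
      if PySem.Chars.isdigit s[i] then
        let j := pvRunEnd s s.length i
        pvScanB s fuel j (numbers ++ [String.ofList (PySem.List.slice s (some (i : Int)) (some (j : Int)))])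
          (indices ++ [(i : Int)]) symbol_indices
      else
        pvScanB s fuel (i + 1) numbers indices
          (if s[i] = '*' then symbol_indices ++ [(i : Int)] else symbol_indices)
    else (numbers, indices, symbol_indices)

def get_numbers_and_symbols_alt (length_of_line : Int) (line : String) : List String × List Int × List Int :=
  let s := PySem.List.slice line.toList none (some (max length_of_line 0))
  pvScanB s s.length 0 [] [] []

-- ===== PRECONDITION & SPEC =====
-- Pre_ excludes exactly the inputs where A raises IndexError (index beyond the end of line)
def Pre_get_numbers_and_symbols (length_of_line : Int) (line : String) : Prop :=
  length_of_line ≤ PySem.Str.len line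
instance (length_of_line : Int) (line : String) : Decidable (Pre_get_numbers_and_symbols length_of_line line) := by
  unfold Pre_get_numbers_and_symbols; infer_instance

def pvWitness_get_numbers_and_symbols : Int × String := (3, "1*2")

def Spec_get_numbers_and_symbols (length_of_line : Int) (line : String) (out : List String × List Int × List Int) : Prop := out = get_numbers_and_symbols_alt length_of_line line
instance (length_of_line : Int) (line : String) (out : List String × List Int × List Int) : Decidable (Spec_get_numbers_and_symbols length_of_line line out) := by unfold Spec_get_numbers_and_symbols; infer_instance

-- ===== CLAIM (what is proved, stated in full; the proofs are below) =====
def Claim_equal_get_numbers_and_symbols : Prop := ∀ (length_of_line : Int) (line : String), Dom_get_numbers_and_symbols length_of_line line → Pre_get_numbers_and_symbols length_of_line line → Spec_get_numbers_and_symbols length_of_line line (get_numbers_and_symbols length_of_line line)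

-- ===== LEMMAS AND PROOFS =====

-- A's loop body with the index and the length-of-line bound read as naturals
def pvStepN (s : List Char) (n : Nat)
    (st : List String × List Int × List Int × List Char) (k : Nat) :
    List String × List Int × List Int × List Char :=
  let (numbers, indices, symbol_indices, number) := st
  let c := s.getD k ' '
  let st' :=
    if PySem.Chars.isdigit c then
      (numbers, indices, symbol_indices, number ++ [c])
    else
      let symbol_indices := if c = '*' then symbol_indices ++ [(k : Int)] else symbol_indices
      if number.length > 0 then
        (numbers ++ [String.ofList number], indices ++ [(k : Int) - (number.length : Int)], symbol_indices, ([] : List Char))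
      else
        (numbers, indices, symbol_indices, number)
  if (k : Int) = (n : Int) - 1 ∧ 0 < st'.2.2.2.length then
    (st'.1 ++ [String.ofList st'.2.2.2], st'.2.1 ++ [(k : Int) - (st'.2.2.2.length : Int) + 1], st'.2.2.1, st'.2.2.2)
  else st'

theorem stepN_digit_mid (s : List Char) (n : Nat) (N : List String) (I S : List Int)
    (b : List Char) (k : Nat) (hd : PySem.Chars.isdigit (s.getD k ' ') = true)
    (hk : ((k : Nat) : Int) ≠ (n : Int) - 1) :
    pvStepN s n (N, I, S, b) k = (N, I, S, b ++ [s.getD k ' ']) := by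
  simp only [List.getD] at hd
  simp [pvStepN, List.getD, hd, hk]

theorem stepN_digit_last (s : List Char) (n : Nat) (N : List String) (I S : List Int)
    (b : List Char) (k : Nat) (hd : PySem.Chars.isdigit (s.getD k ' ') = true)
    (hk : ((k : Nat) : Int) = (n : Int) - 1) :
    pvStepN s n (N, I, S, b) k
      = (N ++ [String.ofList (b ++ [s.getD k ' '])],
         I ++ [((k : Nat) : Int) - (((b ++ [s.getD k ' ']).length : Nat) : Int) + 1],
         S, b ++ [s.getD k ' ']) := by
  simp only [List.getD] at hd
  simp [pvStepN, List.getD, hd, hk]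

theorem stepN_nondigit_empty (s : List Char) (n : Nat) (N : List String) (I S : List Int)
    (k : Nat) (hd : PySem.Chars.isdigit (s.getD k ' ') = false) :
    pvStepN s n (N, I, S, ([] : List Char)) k
      = (N, I, (if s.getD k ' ' = '*' then S ++ [((k : Nat) : Int)] else S), ([] : List Char)) := by
  simp only [List.getD] at hd
  simp [pvStepN, List.getD, hd]

theorem stepN_nondigit_flush (s : List Char) (n : Nat) (N : List String) (I S : List Int)
    (b : List Char) (k : Nat) (hd : PySem.Chars.isdigit (s.getD k ' ') = false)
    (hb : 0 < b.length) :
    pvStepN s n (N, I, S, b) k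
      = (N ++ [String.ofList b], I ++ [((k : Nat) : Int) - ((b.length : Nat) : Int)],
         (if s.getD k ' ' = '*' then S ++ [((k : Nat) : Int)] else S), ([] : List Char)) := by
  simp only [List.getD] at hd
  simp [pvStepN, List.getD, hd, hb]

theorem pvStepA_eq_stepN (line : String) (n : Nat) (hn : n ≤ line.toList.length)
    (st : List String × List Int × List Int × List Char) (k : Nat) (hk : k < n) :
    pvStepA line (n : Int) st (0 + (k : Int)) = pvStepN (line.toList.take n) n st k := by
  obtain ⟨N, I, S, b⟩ := st
  have hg : PySem.List.pyGetD line.toList ((k : Int)) ' ' = (line.toList.take n).getD k ' ' := by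
    rw [PySem.List.pyGetD_natCast]
    simp [List.getD, hk]
  simp only [pvStepA, pvStepN, zero_add, hg]

theorem foldA_eq_foldN (line : String) (n : Nat) (hn : n ≤ line.toList.length)
    (st : List String × List Int × List Int × List Char) :
    (PySem.List.pyRange 0 (n : Int) 1).foldl (pvStepA line (n : Int)) st
      = (List.range' 0 n).foldl (pvStepN (line.toList.take n) n) st := by
  rw [PySem.List.pyRange_one, ← List.range_eq_range']
  simp only [sub_zero, Int.toNat_natCast]
  rw [List.foldl_map]
  exact PySem.List.foldl_congr_mem (l := List.range n) (init := st)
    (f := fun acc x => pvStepA line (n : Int) acc (0 + (x : Int)))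
    (g := pvStepN (line.toList.take n) n)
    (fun acc x hx => pvStepA_eq_stepN line n hn acc x (List.mem_range.mp hx))

-- pvRunEnd facts (the fuel pvScanB passes is always sufficient)
theorem pvRunEnd_ge (s : List Char) : ∀ fuel j, j ≤ pvRunEnd s fuel j := by
  intro fuel
  induction fuel with
  | zero => intro j; simp [pvRunEnd]
  | succ fuel ih =>
    intro j
    rw [pvRunEnd]
    split
    · split
      · exact le_trans (Nat.le_succ j) (ih (j + 1))
      · exact le_refl j
    · exact le_refl j

theorem pvRunEnd_le (s : List Char) : ∀ fuel j, j ≤ s.length → pvRunEnd s fuel j ≤ s.length := by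
  intro fuel
  induction fuel with
  | zero => intro j h; simpa [pvRunEnd]
  | succ fuel ih =>
    intro j h
    rw [pvRunEnd]
    split
    · split
      · exact ih (j + 1) (by omega)
      · exact h
    · exact h

theorem pvRunEnd_gt (s : List Char) (fuel j : Nat) (hf : 0 < fuel) (hj : j < s.length)
    (hd : PySem.Chars.isdigit s[j] = true) : j < pvRunEnd s fuel j := by
  obtain ⟨fuel, rfl⟩ : ∃ f, fuel = f + 1 := ⟨fuel - 1, by omega⟩
  rw [pvRunEnd]
  simp only [hj, hd, dif_pos, if_pos]
  exact lt_of_lt_of_le (Nat.lt_succ_self j) (pvRunEnd_ge s fuel (j + 1))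

theorem pvRunEnd_digits (s : List Char) : ∀ fuel j k, k < s.length →
    j ≤ k → k < pvRunEnd s fuel j → PySem.Chars.isdigit (s.getD k ' ') = true := by
  intro fuel
  induction fuel with
  | zero => intro j k hk h1 h2; simp [pvRunEnd] at h2; omega
  | succ fuel ih =>
    intro j k hk h1 h2
    rw [pvRunEnd] at h2
    by_cases hj : j < s.length
    · rw [dif_pos hj] at h2
      by_cases hd : PySem.Chars.isdigit s[j] = true
      · rw [if_pos hd] at h2
        rcases Nat.eq_or_lt_of_le h1 with rfl | h1'
        · rw [List.getD_eq_getElem _ _ hk]; exact hd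
        · exact ih (j + 1) k hk (by omega) h2
      · rw [if_neg hd] at h2; omega
    · rw [dif_neg hj] at h2; omega

theorem pvRunEnd_stop (s : List Char) : ∀ fuel j, s.length ≤ fuel + j →
    pvRunEnd s fuel j < s.length → PySem.Chars.isdigit (s.getD (pvRunEnd s fuel j) ' ') = false := by
  intro fuel
  induction fuel with
  | zero =>
    intro j hf h
    simp only [pvRunEnd] at h
    omega
  | succ fuel ih =>
    intro j hf h
    by_cases hj : j < s.length
    · by_cases hd : PySem.Chars.isdigit s[j] = true
      · have e : pvRunEnd s (fuel + 1) j = pvRunEnd s fuel (j + 1) := by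
          rw [pvRunEnd]; rw [dif_pos hj, if_pos hd]
        rw [e] at h ⊢
        exact ih (j + 1) (by omega) h
      · have e : pvRunEnd s (fuel + 1) j = j := by
          rw [pvRunEnd]; rw [dif_pos hj, if_neg hd]
        rw [e] at h ⊢
        rw [List.getD_eq_getElem _ _ hj]
        simpa using hd
    · have e : pvRunEnd s (fuel + 1) j = j := by
        rw [pvRunEnd]; rw [dif_neg hj]
      rw [e] at h
      omega

-- a digit run strictly inside the line: the fold only grows the number buffer
theorem foldN_run (s : List Char) : ∀ m i (N : List String) (I S : List Int) (b : List Char),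
    i + m < s.length →
    (∀ k, k < s.length → i ≤ k → k < i + m → PySem.Chars.isdigit (s.getD k ' ') = true) →
    (List.range' i m).foldl (pvStepN s s.length) (N, I, S, b)
      = (N, I, S, b ++ (s.drop i).take m) := by
  intro m
  induction m with
  | zero => intro i N I S b _ _; simp [List.range']
  | succ m ih =>
    intro i N I S b hlt hd
    rw [List.range'_succ, List.foldl_cons]
    have hi : i < s.length := by omega
    have hdi : PySem.Chars.isdigit (s.getD i ' ') = true := hd i hi (le_refl i) (by omega)
    rw [stepN_digit_mid s s.length N I S b i hdi (by omega)]
    rw [ih (i + 1) N I S (b ++ [s.getD i ' ']) (by omega)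
      (fun k hk h1 h2 => hd k hk (by omega) (by omega))]
    rw [List.getD_eq_getElem _ _ hi]
    have htk : List.take (m + 1) (List.drop i s) = s[i] :: List.take m (List.drop (i + 1) s) := by
      rw [List.drop_eq_getElem_cons hi, List.take_succ_cons]
    rw [htk]
    simp

-- a digit run reaching the end of the line: the end-of-loop flush fires
theorem foldN_run_end (s : List Char) (i : Nat) (N : List String) (I S : List Int) (b : List Char)
    (hi : i < s.length)
    (hd : ∀ k, k < s.length → i ≤ k → PySem.Chars.isdigit (s.getD k ' ') = true) :
    (List.range' i (s.length - i)).foldl (pvStepN s s.length) (N, I, S, b)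
      = (N ++ [String.ofList (b ++ s.drop i)], I ++ [(i : Int) - (b.length : Int)], S, b ++ s.drop i) := by
  have hsplit : List.range' i (s.length - i)
      = List.range' i (s.length - 1 - i) ++ [s.length - 1] := by
    have h1 : List.range' i (s.length - 1 - i) ++ List.range' (i + (s.length - 1 - i)) 1
        = List.range' i ((s.length - 1 - i) + 1) := by
      simpa using @List.range'_append i (s.length - 1 - i) 1 1
    rw [show s.length - i = (s.length - 1 - i) + 1 by omega, ← h1,
      show i + (s.length - 1 - i) = s.length - 1 by omega]
    simp
  rw [hsplit, List.foldl_append]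
  rw [foldN_run s (s.length - 1 - i) i N I S b (by omega)
    (fun k hk h1 h2 => hd k hk h1)]
  set b' := b ++ (s.drop i).take (s.length - 1 - i) with hb'
  have hlast : s.length - 1 < s.length := by omega
  have hdl : PySem.Chars.isdigit (s.getD (s.length - 1) ' ') = true := hd (s.length - 1) hlast (by omega)
  have htake : (s.drop i).take (s.length - 1 - i) ++ [s[s.length - 1]] = s.drop i := by
    have h2 : (s.drop i).drop (s.length - 1 - i) = s.drop (s.length - 1) := by
      rw [List.drop_drop]
      congr 1
      omega
    have h3 : s.drop (s.length - 1) = [s[s.length - 1]] := by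
      rw [List.drop_eq_getElem_cons hlast]
      simp [show s.length - 1 + 1 = s.length by omega]
    conv_rhs => rw [← List.take_append_drop (s.length - 1 - i) (s.drop i)]
    rw [h2, h3]
  simp only [List.foldl_cons, List.foldl_nil]
  rw [stepN_digit_last s s.length N I S b' (s.length - 1) hdl (by omega)]
  rw [List.getD_eq_getElem _ _ hlast]
  have hb'' : b' ++ [s[s.length - 1]] = b ++ s.drop i := by
    rw [hb', List.append_assoc, htake]
  rw [hb'']
  have hidx : ((s.length - 1 : Nat) : Int) - (((b ++ s.drop i).length : Nat) : Int) + 1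
      = (i : Int) - (b.length : Int) := by
    have hl : (b ++ s.drop i).length = b.length + (s.length - i) := by simp
    rw [hl]
    omega
  rw [hidx]

-- main invariant: from any position with an empty buffer, A's remaining loop = B's scan
theorem scan_eq_fold (s : List Char) : ∀ fuel i (N : List String) (I S : List Int),
    s.length ≤ fuel + i → i ≤ s.length →
    (((List.range' i (s.length - i)).foldl (pvStepN s s.length) (N, I, S, ([] : List Char))).1,
     ((List.range' i (s.length - i)).foldl (pvStepN s s.length) (N, I, S, ([] : List Char))).2.1,
     ((List.range' i (s.length - i)).foldl (pvStepN s s.length) (N, I, S, ([] : List Char))).2.2.1)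
      = pvScanB s fuel i N I S := by
  intro fuel
  induction fuel with
  | zero =>
    intro i N I S hf hi
    have : i = s.length := by omega
    subst this
    simp [pvScanB, List.range']
  | succ fuel ih =>
    intro i N I S hf hi
    rw [pvScanB]
    by_cases h : i < s.length
    · rw [dif_pos h]
      by_cases hd : PySem.Chars.isdigit s[i] = true
      · rw [if_pos hd]
        set j := pvRunEnd s s.length i with hj
        have hij : i < j := pvRunEnd_gt s s.length i (by omega) h hd
        have hjle : j ≤ s.length := pvRunEnd_le s s.length i (le_of_lt h)
        have hdig : ∀ k, k < s.length → i ≤ k → k < j → PySem.Chars.isdigit (s.getD k ' ') = true :=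
          fun k hk h1 h2 => pvRunEnd_digits s s.length i k hk h1 h2
        rw [← ih j (N ++ [String.ofList (PySem.List.slice s (some (i : Int)) (some (j : Int)))])
          (I ++ [(i : Int)]) S (by omega) hjle]
        have hslice : PySem.List.slice s (some (i : Int)) (some (j : Int)) = (s.drop i).take (j - i) :=
          PySem.List.slice_natCast s i j
        have hsplit : List.range' i (s.length - i)
            = List.range' i (j - i) ++ List.range' j (s.length - j) := by
          have h1 : List.range' i (j - i) ++ List.range' (i + (j - i)) (s.length - j)
              = List.range' i ((j - i) + (s.length - j)) := by
            simpa using @List.range'_append i (j - i) (s.length - j) 1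
          rw [show i + (j - i) = j by omega] at h1
          rw [show s.length - i = (j - i) + (s.length - j) by omega]
          exact h1.symm
        rw [hsplit, List.foldl_append]
        rcases Nat.eq_or_lt_of_le hjle with hje | hjlt
        · -- run reaches the end of the line
          rw [show j - i = s.length - i by omega]
          rw [foldN_run_end s i N I S [] h (fun k hk h1 => hdig k hk h1 (by omega))]
          rw [show s.length - j = 0 by omega]
          simp only [List.range'_zero, List.foldl_nil]
          rw [hslice]
          rw [show j - i = s.length - i by omega]
          have htk : (s.drop i).take (s.length - i) = s.drop i := by
            apply List.take_of_length_le
            simp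
          rw [htk]
          simp
        · -- run stops at a non-digit inside the line
          rw [foldN_run s (j - i) i N I S [] (by omega)
            (fun k hk h1 h2 => hdig k hk h1 (by omega))]
          rw [show s.length - j = (s.length - j - 1) + 1 by omega, List.range'_succ]
          simp only [List.foldl_cons]
          set run := (s.drop i).take (j - i) with hrun
          have hrunlen : run.length = j - i := by
            rw [hrun]
            simp
            omega
          have hrunpos : 0 < run.length := by omega
          have hstop : PySem.Chars.isdigit (s.getD j ' ') = false :=
            pvRunEnd_stop s s.length i (by omega) hjlt
          rw [show (([] : List Char) ++ run) = run from List.nil_append run]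
          rw [stepN_nondigit_flush s s.length N I S run j hstop hrunpos]
          rw [stepN_nondigit_empty s s.length
            (N ++ [String.ofList (PySem.List.slice s (some (i : Int)) (some (j : Int)))])
            (I ++ [(i : Int)]) S j hstop]
          rw [hslice, hrunlen]
          rw [show ((j : Nat) : Int) - (((j - i : Nat) : Nat) : Int) = (i : Int) by omega]
      · rw [if_neg hd]
        rw [← ih (i + 1) N I (if s[i] = '*' then S ++ [(i : Int)] else S) (by omega) (by omega)]
        rw [show s.length - i = (s.length - i - 1) + 1 by omega, List.range'_succ, List.foldl_cons]
        have hgd : s.getD i ' ' = s[i] := List.getD_eq_getElem s ' ' h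
        have hnd : PySem.Chars.isdigit (s.getD i ' ') = false := by
          rw [hgd]
          simpa using hd
        rw [stepN_nondigit_empty s s.length N I S i hnd]
        rw [hgd]
        rw [show s.length - (i + 1) = s.length - i - 1 from by omega]
    · rw [dif_neg h]
      have : i = s.length := by omega
      subst this
      simp [List.range']

-- ===== VERDICT (by name: the statement is the Claim_ definition above) =====
theorem get_numbers_and_symbols_spec : Claim_equal_get_numbers_and_symbols := by
  intro L line _ hPre
  unfold Pre_get_numbers_and_symbols at hPre
  rw [show PySem.Str.len line = (line.toList.length : Int) by simp] at hPre
  unfold Spec_get_numbers_and_symbols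
  unfold get_numbers_and_symbols get_numbers_and_symbols_alt
  by_cases hL : L ≤ 0
  · rw [PySem.List.pyRange_one_eq_nil hL]
    rw [max_eq_right hL]
    rw [show PySem.List.slice line.toList none (some 0)
      = line.toList.take (0 : Nat) from PySem.List.slice_to_natCast line.toList 0]
    simp [pvScanB]
  · have hL0 : 0 ≤ L := by omega
    set n := L.toNat with hn
    have hLn : L = (n : Int) := (Int.toNat_of_nonneg hL0).symm
    have hnlen : n ≤ line.toList.length := by omega
    set s := line.toList.take n with hs
    have hslen : s.length = n := by
      rw [hs, List.length_take]
      exact Nat.min_eq_left hnlen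
    rw [hLn]
    rw [foldA_eq_foldN line n hnlen]
    rw [max_eq_left (by positivity : (0 : Int) ≤ (n : Int))]
    rw [PySem.List.slice_to_natCast line.toList n]
    rw [← scan_eq_fold s s.length 0 [] [] [] (by omega) (by omega)]
    simp only [hslen, Nat.sub_zero]
    rfl
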